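-- pv_equiv track=rewrite | github.com/wathenro/sala-dfa | src/algoritmit/tee_NFA.py | etsi_sulkulause
-- ===== SOURCE A (Python) =====
-- def etsi_sulkulause(lause_suluissa):
--     """Palauttaa stringin
--
--     Etsii syötetystä lauseesta joka alkaa (-lla uloimman sulkulauseen. Esimerkiksi
--     syötteen (asd*(sdds)*)*ads(sdfs)+ tulisi palauttaa (asd*(sdds)*)*
--     """
--     vasen_sulku=0
--     oikea_sulku=0
--     sulkulause=""
--     for indeksi in range(0,len(lause_suluissa)):
--         if lause_suluissa[indeksi]=="(":
--             vasen_sulku+=1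
--             sulkulause=sulkulause+lause_suluissa[indeksi]
--         if lause_suluissa[indeksi]!="(" and lause_suluissa[indeksi]!=")":
--             sulkulause=sulkulause+lause_suluissa[indeksi]
--         if lause_suluissa[indeksi]==")":
--             oikea_sulku+=1
--             sulkulause=sulkulause+lause_suluissa[indeksi]
--         if vasen_sulku==oikea_sulku: #jos oikeita ja vasempia sulkuja on yhtä paljon, on koossa yksi kokonaisuus
--             if (lause_suluissa[indeksi+1]=="*" or lause_suluissa[indeksi+1]=="+"):
--                 sulkulause+=lause_suluissa[indeksi+1]
--                 return sulkulause
--             else: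
--                 return sulkulause
-- ===== SOURCE B (Python) =====
-- def etsi_sulkulause(lause_suluissa):
--     """Palauttaa stringin
--
--     Kaksivaiheinen toteutus: ensin rakennetaan sulkusaldon etuliitetaulukko,
--     sitten etsitaan ensimmainen indeksi jossa saldo on 0 ja palautetaan viipale.
--     """
--     saldot = []
--     saldo = 0
--     for merkki in lause_suluissa:
--         saldo += (merkki == "(") - (merkki == ")")
--         saldot.append(saldo)
--     for indeksi, b in enumerate(saldot):
--         if b == 0:
--             seuraava = lause_suluissa[indeksi + 1]
--             if seuraava == "*" or seuraava == "+":
--                 return lause_suluissa[:indeksi + 2]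
--             return lause_suluissa[:indeksi + 1]
--     return None
-- ===== Notes on version B (the rewrite author's own statement) =====
-- stated objective: alternative
-- what changed: A interleaves two bracket counters with char-by-char string accumulation in one loop; B first builds a prefix-balance table over the string, then scans it for the first zero and returns a slice of the input.
-- outside the precondition, e.g. on etsi_sulkulause('('): A returns None, B returns None; on etsi_sulkulause(')'): A returns None, B returns None; on etsi_sulkulause('(a)'): A raises IndexError, B raises IndexError
import Mathlib
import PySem

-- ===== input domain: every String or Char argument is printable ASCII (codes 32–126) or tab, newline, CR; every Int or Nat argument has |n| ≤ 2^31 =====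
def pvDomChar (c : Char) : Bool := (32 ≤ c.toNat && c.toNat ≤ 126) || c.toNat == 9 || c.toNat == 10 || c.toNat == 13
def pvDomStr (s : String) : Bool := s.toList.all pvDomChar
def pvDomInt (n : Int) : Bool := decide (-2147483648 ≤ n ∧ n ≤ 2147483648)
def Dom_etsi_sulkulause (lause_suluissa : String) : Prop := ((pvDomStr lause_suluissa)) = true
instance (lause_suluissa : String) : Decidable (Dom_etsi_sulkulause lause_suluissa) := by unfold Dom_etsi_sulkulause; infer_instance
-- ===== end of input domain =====

-- B builds a prefix-balance table and slices at the first zero, instead of A's single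
-- loop with two counters and char-by-char accumulation (objective: alternative).

-- ===== PORT A =====
-- one iteration per remaining char; v/o are the '(' and ')' counters, acc the accumulated string
def etsiLoop : List Char → Int → Int → List Char → String
  | [], _, _, _ => ""          -- loop falls through: Python returns None (excluded by Pre_)
  | c :: rs, v, o, acc =>
    let v' := if c = '(' then v + 1 else v
    let acc1 := if c = '(' then acc ++ [c] else acc
    let acc2 := if c ≠ '(' ∧ c ≠ ')' then acc1 ++ [c] else acc1
    let o' := if c = ')' then o + 1 else o
    let acc3 := if c = ')' then acc2 ++ [c] else acc2
    if v' = o' then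
      match rs with
      | [] => ""               -- lause_suluissa[indeksi+1]: IndexError (excluded by Pre_)
      | d :: _ => if d = '*' ∨ d = '+' then String.mk (acc3 ++ [d]) else String.mk acc3
    else etsiLoop rs v' o' acc3

def etsi_sulkulause (lause_suluissa : String) : String :=
  etsiLoop lause_suluissa.toList 0 0 []

-- ===== PORT B =====
-- first pass: prefix-balance table
def balTable : List Char → Int → List Int
  | [], _ => []
  | c :: rs, b =>
    let b' := b + (if c = '(' then 1 else 0) - (if c = ')' then 1 else 0)
    b' :: balTable rs b'

-- second pass: scan the table for the first zero; slice the input there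
def altScan (cs : List Char) : List Int → Nat → String
  | [], _ => ""                -- no zero balance: Python returns None (excluded by Pre_)
  | b :: bs, i =>
    if b = 0 then
      match cs[i+1]? with
      | none => ""             -- lause_suluissa[indeksi+1]: IndexError (excluded by Pre_)
      | some d => if d = '*' ∨ d = '+' then String.mk (cs.take (i+2)) else String.mk (cs.take (i+1))
    else altScan cs bs (i+1)

def etsi_sulkulause_alt (lause_suluissa : String) : String :=
  altScan lause_suluissa.toList (balTable lause_suluissa.toList 0) 0

-- ===== PRECONDITION & SPEC =====
-- Pre_ excludes exactly the inputs where Python A returns None (no prefix with equally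
-- many '(' and ')') or raises IndexError (the first balanced prefix is the whole string).
def Pre_etsi_sulkulause (lause_suluissa : String) : Prop :=
  ∃ i < lause_suluissa.toList.length, i + 1 < lause_suluissa.toList.length ∧
    (lause_suluissa.toList.take (i+1)).count '(' = (lause_suluissa.toList.take (i+1)).count ')'
instance (lause_suluissa : String) : Decidable (Pre_etsi_sulkulause lause_suluissa) := by
  unfold Pre_etsi_sulkulause; infer_instance

def pvWitness_etsi_sulkulause : String := "(a)b"

def Spec_etsi_sulkulause (lause_suluissa : String) (out : String) : Prop := out = etsi_sulkulause_alt lause_suluissa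
instance (lause_suluissa : String) (out : String) : Decidable (Spec_etsi_sulkulause lause_suluissa out) := by unfold Spec_etsi_sulkulause; infer_instance

-- ===== CLAIM (what is proved, stated in full; the proofs are below) =====
def Claim_equal_etsi_sulkulause : Prop := ∀ (lause_suluissa : String), Dom_etsi_sulkulause lause_suluissa → Pre_etsi_sulkulause lause_suluissa → Spec_etsi_sulkulause lause_suluissa (etsi_sulkulause lause_suluissa)

-- ===== LEMMAS AND PROOFS =====

-- The two ports agree on EVERY string (both return "" where their Pythons raise/return None).
lemma etsi_key : ∀ (rest taken : List Char) (v o b : Int), v - o = b →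
    etsiLoop rest v o taken = altScan (taken ++ rest) (balTable rest b) taken.length := by
  intro rest
  induction rest with
  | nil => intro taken v o b _; simp [etsiLoop, balTable, altScan]
  | cons c rs ih =>
    intro taken v o b hb
    simp only [etsiLoop, balTable, altScan]
    have hdelta : (if c = '(' then v + 1 else v) - (if c = ')' then o + 1 else o)
        = b + (if c = '(' then 1 else 0) - (if c = ')' then 1 else 0) := by
      split_ifs <;> omega
    have hacc : (if c = ')' then
          (if c ≠ '(' ∧ c ≠ ')' then (if c = '(' then taken ++ [c] else taken) ++ [c]
            else (if c = '(' then taken ++ [c] else taken)) ++ [c]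
        else (if c ≠ '(' ∧ c ≠ ')' then (if c = '(' then taken ++ [c] else taken) ++ [c]
            else (if c = '(' then taken ++ [c] else taken))) = taken ++ [c] := by
      by_cases h1 : c = '(' <;> by_cases h2 : c = ')' <;> simp [h1, h2]
    have hzero : ((if c = '(' then v + 1 else v) = (if c = ')' then o + 1 else o))
        ↔ (b + (if c = '(' then 1 else 0) - (if c = ')' then 1 else 0) = 0) := by
      constructor <;> intro h <;> omega
    rw [hacc]
    by_cases hz : b + (if c = '(' then 1 else 0) - (if c = ')' then 1 else 0) = 0
    · rw [if_pos (hzero.mpr hz), if_pos hz]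
      have hget : (taken ++ c :: rs)[taken.length + 1]? = rs[0]? := by
        rw [List.getElem?_append_right (by omega)]
        simp
      rw [hget]
      cases rs with
      | nil => simp
      | cons d rs' =>
        simp only [List.getElem?_cons_zero]
        have ht1 : (taken ++ c :: d :: rs').take (taken.length + 1) = taken ++ [c] := by
          rw [show taken.length + 1 = taken.length + 1 from rfl,
              List.take_append]
          simp
        have ht2 : (taken ++ c :: d :: rs').take (taken.length + 2) = taken ++ [c, d] := by
          rw [List.take_append]
          simp
        rw [ht1, ht2]
        by_cases hd : d = '*' ∨ d = '+' <;> simp [hd]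
    · rw [if_neg (fun h => hz (hzero.mp h)), if_neg hz]
      have := ih (taken ++ [c]) (if c = '(' then v + 1 else v) (if c = ')' then o + 1 else o)
        (b + (if c = '(' then 1 else 0) - (if c = ')' then 1 else 0)) hdelta
      simpa using this

-- ===== VERDICT (by name: the statement is the Claim_ definition above) =====
theorem etsi_sulkulause_spec : Claim_equal_etsi_sulkulause := by
  intro s _ _
  unfold Spec_etsi_sulkulause etsi_sulkulause etsi_sulkulause_alt
  simpa using etsi_key s.toList [] 0 0 0 rfl
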